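-- pv_equiv track=rewrite | github.com/md143rbh7f/competitions | topcoder/srm/610/TheMatrix.py | MaxArea
-- ===== SOURCE A (Python) =====
-- def MaxArea(b):
--     n, m, ans = len(b), len(b[0]), 0
--     s = [0] * m
--     for i in range(n):
--         for j in range(m):
--             h = s[j] = 1 + (i > 0 and b[i][j] != b[i-1][j]) * s[j]
--             ans = max(ans, h)
--             for k in range(j):
--                 if b[i][j-k-1] == b[i][j-k]:
--                     break
--                 h = min(h, s[j-k-1])
--                 ans = max(ans, h * (k + 2))
--     return ans
-- ===== SOURCE B (Python) =====
-- def largest_rect(hs):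
--     if not hs:
--         return 0
--     v = min(hs)
--     i = hs.index(v)
--     return max(len(hs) * v, max(largest_rect(hs[:i]), largest_rect(hs[i+1:])))
--
-- def MaxArea(b):
--     m = len(b[0])
--     s = [0] * m
--     ans = 0
--     for i in range(len(b)):
--         row = b[i]
--         s = [1 + (i > 0 and row[j] != b[i-1][j]) * s[j] for j in range(m)]
--         start = 0
--         for j in range(m):
--             if j + 1 == m or row[j] == row[j+1]:
--                 ans = max(ans, largest_rect(s[start:j+1]))
--                 start = j + 1
--     return ans
-- ===== Notes on version B (the rewrite author's own statement) =====
-- stated objective: alternative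
-- what changed: A's per-cell leftward rescans are replaced by splitting each row into maximal alternating runs and computing the largest rectangle in each run's height histogram by recursive splitting at the minimum height.
import Mathlib
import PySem

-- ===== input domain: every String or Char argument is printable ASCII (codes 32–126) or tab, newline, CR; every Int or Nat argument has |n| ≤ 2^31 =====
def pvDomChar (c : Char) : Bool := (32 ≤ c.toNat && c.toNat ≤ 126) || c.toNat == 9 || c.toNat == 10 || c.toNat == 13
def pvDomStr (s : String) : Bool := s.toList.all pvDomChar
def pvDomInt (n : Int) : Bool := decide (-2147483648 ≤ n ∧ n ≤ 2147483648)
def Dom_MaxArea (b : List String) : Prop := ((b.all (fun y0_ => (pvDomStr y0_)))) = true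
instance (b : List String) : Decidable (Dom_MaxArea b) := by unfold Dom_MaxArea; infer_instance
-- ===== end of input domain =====

-- B replaces A's per-cell leftward rescans by per-row maximal alternating runs with a
-- recursive min-split largest-rectangle computation on each run's height histogram;
-- equality of the returned value is proved on Pre_ (where the Python A returns).


-- ===== PORT A =====
-- b[i][j] (in range wherever either Python reads it, under Pre_; both Pythons index alike)
def pvGetC (b : List String) (i j : Nat) : Char := ((b.getD i "").toList.getD j ' ')

-- A's inner `for k in range(j)` with its break (early return), state (h, ans); rem = j - k
def pvInnerA (b : List String) (i : Nat) (s : List Int) (j : Nat) : Nat → Nat → Int → Int → Int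
  | _, 0, _, ans => ans
  | k, rem+1, h, ans =>
    if pvGetC b i (j-k-1) = pvGetC b i (j-k) then ans
    else
      pvInnerA b i s j (k+1) rem (min h (s.getD (j-k-1) 0))
        (max ans ((min h (s.getD (j-k-1) 0)) * ((k : Int)+2)))

-- A's body of `for j in range(m)`: h = s[j] = 1 + (i>0 and b[i][j]!=b[i-1][j])*s[j]; …
def pvColA (b : List String) (i : Nat) (st : List Int × Int) (j : Nat) : List Int × Int :=
  let h : Int := 1 + (if 0 < i ∧ pvGetC b i j ≠ pvGetC b (i-1) j then st.1.getD j 0 else 0)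
  let s' := st.1.set j h
  (s', pvInnerA b i s' j 0 j h (max st.2 h))

def MaxArea (b : List String) : Int :=
  let m := (b.headD "").toList.length
  ((List.range b.length).foldl (fun st i => (List.range m).foldl (pvColA b i) st)
    (List.replicate m 0, 0)).2

-- ===== PORT B =====
-- termination fact for largest_rect: the index of the minimum is in range
theorem pv_idxOf_min_lt (x : Int) (xs : List Int) :
    (x::xs).idxOf (((x::xs).min?).getD 0) < (x::xs).length := by
  have h : (x::xs).min? = some (xs.foldl min x) := List.min?_cons'
  have hm : (xs.foldl min x) ∈ x :: xs := List.min?_mem h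
  rw [h]
  exact List.idxOf_lt_length_of_mem hm

-- Source B largest_rect: split at (first index of) the minimum, recurse on both sides
def pvLargestRect : List Int → Int
  | [] => 0
  | x :: xs =>
    max (((x :: xs).length : Int) * (((x::xs).min?).getD 0))
      (max (pvLargestRect ((x::xs).take ((x::xs).idxOf (((x::xs).min?).getD 0))))
           (pvLargestRect ((x::xs).drop ((x::xs).idxOf (((x::xs).min?).getD 0) + 1))))
termination_by l => l.length
decreasing_by
  · have h := pv_idxOf_min_lt x xs
    simp only [List.length_cons, List.length_take] at *
    omega
  · have h := pv_idxOf_min_lt x xs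
    simp only [List.length_cons, List.length_drop] at *
    omega

def MaxArea_alt (b : List String) : Int :=
  let m := (b.headD "").toList.length
  ((List.range b.length).foldl (fun (st : List Int × Int) i =>
      -- s = [1 + (i > 0 and row[j] != b[i-1][j]) * s[j] for j in range(m)]
      let s := (List.range m).map
        (fun j => 1 + (if 0 < i ∧ pvGetC b i j ≠ pvGetC b (i-1) j then st.1.getD j 0 else 0))
      -- scan the row, flushing each maximal alternating run [start..j] through largest_rect
      let p := (List.range m).foldl (fun (p : Int × Nat) j =>
        if j + 1 = m ∨ pvGetC b i j = pvGetC b i (j+1)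
        then (max p.1 (pvLargestRect ((s.drop p.2).take (j+1 - p.2))), j+1)
        else p) (st.2, 0)
      (s, p.1))
    (List.replicate m 0, 0)).2

-- ===== PRECONDITION & SPEC =====
-- Pre_ excludes exactly the inputs where Python A raises IndexError: the empty list
-- (len(b[0])) and matrices whose later rows are shorter than the first row.
def Pre_MaxArea (b : List String) : Prop :=
  b ≠ [] ∧ ∀ r ∈ b, (b.headD "").toList.length ≤ r.toList.length
instance (b : List String) : Decidable (Pre_MaxArea b) := by unfold Pre_MaxArea; infer_instance
def pvWitness_MaxArea : List String := ["ab", "bb"]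
def Spec_MaxArea (b : List String) (out : Int) : Prop := out = MaxArea_alt b
instance (b : List String) (out : Int) : Decidable (Spec_MaxArea b out) := by
  unfold Spec_MaxArea; infer_instance

-- ===== CLAIM (what is proved, stated in full; the proofs are below) =====
def Claim_equal_MaxArea : Prop :=
  ∀ (b : List String), Dom_MaxArea b → Pre_MaxArea b → Spec_MaxArea b (MaxArea b)

-- ===== LEMMAS AND PROOFS =====

-- min of a list (0 for []), as both Pythons' min over nonempty lists
def pvMin (xs : List Int) : Int := (xs.min?).getD 0
def pvMax (xs : List Int) : Int := (xs.max?).getD 0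

theorem pvMin_mem {xs : List Int} (h : xs ≠ []) : pvMin xs ∈ xs := by
  obtain ⟨x, t, rfl⟩ := List.exists_cons_of_ne_nil h
  exact List.min?_mem (xs := x::t) (by simp [pvMin])

theorem pvMin_le {xs : List Int} {y : Int} (h : y ∈ xs) : pvMin xs ≤ y := by
  obtain ⟨x, t, rfl⟩ := List.exists_cons_of_ne_nil (List.ne_nil_of_mem h)
  have hc : (x::t).min? = some (pvMin (x::t)) := by simp [pvMin]
  exact ((List.min?_eq_some_iff).1 hc).2 y h

theorem le_pvMin {xs : List Int} {c : Int} (h : xs ≠ []) (hb : ∀ y ∈ xs, c ≤ y) :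
    c ≤ pvMin xs := hb _ (pvMin_mem h)

theorem pvMin_eq {xs : List Int} {v : Int} (hm : v ∈ xs) (hb : ∀ y ∈ xs, v ≤ y) :
    pvMin xs = v :=
  le_antisymm (pvMin_le hm) (le_pvMin (List.ne_nil_of_mem hm) hb)

theorem le_pvMax {xs : List Int} {y : Int} (h : y ∈ xs) : y ≤ pvMax xs := by
  obtain ⟨x, t, rfl⟩ := List.exists_cons_of_ne_nil (List.ne_nil_of_mem h)
  have hc : (x::t).max? = some (pvMax (x::t)) := by simp [pvMax]
  exact ((List.max?_eq_some_iff).1 hc).2 y h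

theorem pvMax_mem {xs : List Int} (h : xs ≠ []) : pvMax xs ∈ xs := by
  obtain ⟨x, t, rfl⟩ := List.exists_cons_of_ne_nil h
  exact List.max?_mem (xs := x::t) (by simp [pvMax])

theorem pvMax_le {xs : List Int} {c : Int} (h : xs ≠ []) (hb : ∀ y ∈ xs, y ≤ c) :
    pvMax xs ≤ c := hb _ (pvMax_mem h)

theorem pvMax_eq_of_mem_iff {l₁ l₂ : List Int} (h₁ : l₁ ≠ []) (h₂ : l₂ ≠ [])
    (h : ∀ y, y ∈ l₁ ↔ y ∈ l₂) : pvMax l₁ = pvMax l₂ :=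
  le_antisymm (pvMax_le h₁ fun y hy => le_pvMax ((h y).1 hy))
    (pvMax_le h₂ fun y hy => le_pvMax ((h y).2 hy))

theorem pvMin_cons_of_ne {x : Int} {ys : List Int} (h : ys ≠ []) :
    pvMin (x :: ys) = min x (pvMin ys) := by
  refine pvMin_eq ?_ ?_
  · rcases min_choice x (pvMin ys) with hc | hc <;> rw [hc]
    · exact List.mem_cons_self
    · exact List.mem_cons_of_mem _ (pvMin_mem h)
  · intro y hy
    rcases List.mem_cons.1 hy with rfl | hy
    · exact min_le_left _ _
    · exact le_trans (min_le_right _ _) (pvMin_le hy)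

theorem pvMax_cons_of_ne {x : Int} {ys : List Int} (h : ys ≠ []) :
    pvMax (x :: ys) = max x (pvMax ys) := by
  refine le_antisymm (pvMax_le (by simp) ?_) (max_le (le_pvMax List.mem_cons_self)
    (pvMax_le h fun y hy => le_pvMax (List.mem_cons_of_mem _ hy)))
  intro y hy
  rcases List.mem_cons.1 hy with rfl | hy
  · exact le_max_left _ _
  · exact le_trans (le_pvMax hy) (le_max_right _ _)

-- foldl of max over a nonempty list is max of the start and the list's max
theorem pv_foldl_max {α : Type} (f : α → Int) :
    ∀ (l : List α), l ≠ [] → ∀ a : Int,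
      l.foldl (fun a x => max a (f x)) a = max a (pvMax (l.map f))
  | [], h, _ => absurd rfl h
  | x :: xs, _, a => by
    cases xs with
    | nil => simp [pvMax]
    | cons y t =>
      rw [List.foldl_cons, pv_foldl_max f (y::t) (by simp)]
      simp only [List.map_cons]
      rw [pvMax_cons_of_ne (x := f x) (ys := f y :: List.map f t) (by simp), max_assoc]

theorem pvMax_flatMap {α : Type} (inner : α → List Int) :
    ∀ (l : List α), l ≠ [] → (∀ x ∈ l, inner x ≠ []) →
      pvMax (l.flatMap inner) = pvMax (l.map fun x => pvMax (inner x))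
  | [], h, _ => absurd rfl h
  | x :: xs, _, hi => by
    have hfm : (x :: xs).flatMap inner ≠ [] := by
      have := hi x List.mem_cons_self
      simp only [List.flatMap_cons, ne_eq, List.append_eq_nil_iff, not_and]
      intro h; exact absurd h this
    refine le_antisymm (pvMax_le hfm ?_) (pvMax_le (by simp) ?_)
    · intro y hy
      obtain ⟨z, hz, hyz⟩ := List.mem_flatMap.1 hy
      exact le_trans (le_pvMax hyz) (le_pvMax (List.mem_map.2 ⟨z, hz, rfl⟩))
    · intro y hy
      obtain ⟨z, hz, rfl⟩ := List.mem_map.1 hy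
      exact le_pvMax (List.mem_flatMap.2 ⟨z, hz, pvMax_mem (hi z hz)⟩)

-- windows of a height function
def pvW (f : Nat → Int) (l r : Nat) : List Int := (List.range' l (r+1-l)).map f
def pvArea (f : Nat → Int) (w r : Nat) : Int := ((w : Int)+1) * pvMin (pvW f (r-w) r)

-- back-run length: number of consecutive differing adjacent pairs ending at j
def pvT (g : Nat → Char) : Nat → Nat
  | 0 => 0
  | j+1 => if g j = g (j+1) then 0 else pvT g j + 1

-- the common per-row specification: fold over all alternating windows (r-w..r)
def pvSpecRow (g : Nat → Char) (f : Nat → Int) (m : Nat) (a : Int) : Int :=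
  (List.range m).foldl
    (fun a r => (List.range (pvT g r + 1)).foldl (fun a w => max a (pvArea f w r)) a) a

-- the fresh height row both programs compute
def pvNewS (b : List String) (i m : Nat) (s : List Int) : List Int :=
  (List.range m).map
    (fun j => 1 + (if 0 < i ∧ pvGetC b i j ≠ pvGetC b (i-1) j then s.getD j 0 else 0))

-- relative window of a list as a pvW window of its getD function
def pvAreaOf (xs : List Int) (l r : Nat) : Int :=
  ((r+1-l : Nat) : Int) * pvMin ((xs.drop l).take (r+1-l))

def pvAreas (xs : List Int) : List Int :=
  (List.range xs.length).flatMap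
    (fun r => (List.range (r+1)).map (fun l => pvAreaOf xs l r))

theorem pvAreas_mem {xs : List Int} {y : Int} :
    y ∈ pvAreas xs ↔ ∃ l r, l ≤ r ∧ r < xs.length ∧ y = pvAreaOf xs l r := by
  simp only [pvAreas, List.mem_flatMap, List.mem_map, List.mem_range]
  constructor
  · rintro ⟨r, hr, l, hl, rfl⟩; exact ⟨l, r, by omega, hr, rfl⟩
  · rintro ⟨l, r, hlr, hr, rfl⟩; exact ⟨r, hr, l, by omega, rfl⟩


theorem pv_slice_eq_W (xs : List Int) (w l : Nat) (h : l + w ≤ xs.length) :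
    (xs.drop l).take w = (List.range' l w).map (fun t => xs.getD t 0) := by
  apply List.ext_getElem
  · simp; omega
  · intro i h1 h2
    have h2' : i < w := by simpa using h2
    simp only [List.getElem_take, List.getElem_drop, List.getElem_map, List.getElem_range']
    rw [List.getD_eq_getElem _ _ (by omega)]
    congr 1
    omega

theorem pvW_singleton (f : Nat → Int) (r : Nat) : pvW f r r = [f r] := by
  simp [pvW]

theorem pvW_ne_nil (f : Nat → Int) {l r : Nat} (h : l ≤ r) : pvW f l r ≠ [] := by
  simp [pvW]
  omega

theorem pvW_cons (f : Nat → Int) {l r : Nat} (h : l < r) :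
    pvW f l r = f l :: pvW f (l+1) r := by
  have h1 : r + 1 - l = (r - l - 1) + 1 + 1 := by omega
  have h2 : r + 1 - (l+1) = (r - l - 1) + 1 := by omega
  simp only [pvW, h1, h2, List.range'_succ, List.map_cons]

theorem pvMin_W_cons (f : Nat → Int) {l r : Nat} (h : l < r) :
    pvMin (pvW f l r) = min (f l) (pvMin (pvW f (l+1) r)) := by
  rw [pvW_cons f h, pvMin_cons_of_ne (pvW_ne_nil f h)]

theorem pvT_le (g : Nat → Char) : ∀ j, pvT g j ≤ j
  | 0 => le_refl 0
  | j+1 => by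
    unfold pvT
    split
    · omega
    · have := pvT_le g j; omega

theorem pvT_diff (g : Nat → Char) : ∀ j w, w < pvT g j → g (j-w-1) ≠ g (j-w)
  | 0, w, h => by simp [pvT] at h
  | j+1, w, h => by
    unfold pvT at h
    split at h
    · omega
    · match w with
      | 0 =>
        have e1 : j + 1 - 0 - 1 = j := by omega
        have e2 : j + 1 - 0 = j + 1 := by omega
        rw [e1, e2]
        assumption
      | w'+1 =>
        have e1 : j + 1 - (w'+1) - 1 = j - w' - 1 := by omega
        have e2 : j + 1 - (w'+1) = j - w' := by omega
        rw [e1, e2]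
        exact pvT_diff g j w' (by omega)

theorem pvT_eq (g : Nat → Char) : ∀ j, pvT g j < j → g (j - pvT g j - 1) = g (j - pvT g j)
  | 0, h => by simp at h
  | j+1, h => by
    by_cases hE : g j = g (j+1)
    · have e0 : pvT g (j+1) = 0 := by simp [pvT, hE]
      rw [e0]
      simpa using hE
    · have e0 : pvT g (j+1) = pvT g j + 1 := by simp [pvT, hE]
      rw [e0] at h ⊢
      have e1 : j + 1 - (pvT g j + 1) - 1 = j - pvT g j - 1 := by omega
      have e2 : j + 1 - (pvT g j + 1) = j - pvT g j := by omega
      rw [e1, e2]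
      exact pvT_eq g j (by omega)


theorem pv_slice_left (A B : List Int) (l w : Nat) (h : l + w ≤ A.length) :
    ((A ++ B).drop l).take w = (A.drop l).take w := by
  rw [List.drop_append_of_le_length (by omega),
    List.take_append_of_le_length (by simp [List.length_drop]; omega)]

theorem pv_areaOf_left (A B : List Int) (l r : Nat) (h : r < A.length) (hlr : l ≤ r) :
    pvAreaOf (A ++ B) l r = pvAreaOf A l r := by
  unfold pvAreaOf
  rw [pv_slice_left A B l (r+1-l) (by omega)]

theorem pv_slice_right (A B : List Int) (l w : Nat) :
    ((A ++ B).drop (A.length + l)).take w = (B.drop l).take w := by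
  have h1 : A.drop (A.length + l) = [] := List.drop_eq_nil_of_le (by omega)
  have h2 : A.length + l - A.length = l := by omega
  rw [List.drop_append, h1, h2, List.nil_append]

theorem pv_areaOf_right (A B : List Int) (l r : Nat) :
    pvAreaOf (A ++ B) (A.length + l) (A.length + r) = pvAreaOf B l r := by
  unfold pvAreaOf
  have e : A.length + r + 1 - (A.length + l) = r + 1 - l := by omega
  rw [e, pv_slice_right]

theorem pv_min_window (xs : List Int) (i l r : Nat) (hi : i < xs.length) (hr : r < xs.length)
    (hli : l ≤ i) (hir : i ≤ r) (hb : ∀ y ∈ xs, xs[i] ≤ y) :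
    pvMin ((xs.drop l).take (r+1-l)) = xs[i] := by
  apply pvMin_eq
  · have hlen : ((xs.drop l).take (r+1-l)).length = r+1-l := by
      simp [List.length_take, List.length_drop]; omega
    have h1 : i - l < ((xs.drop l).take (r+1-l)).length := by rw [hlen]; omega
    have h2 : ((xs.drop l).take (r+1-l))[i-l] = xs[i] := by
      rw [List.getElem_take, List.getElem_drop]
      congr 1
      omega
    exact h2 ▸ List.getElem_mem h1
  · intro y hy
    exact hb y (List.drop_subset _ _ (List.take_subset _ _ hy))

theorem pv_decomp (xs : List Int) (i : Nat) (h : i < xs.length) :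
    xs = xs.take i ++ xs[i] :: xs.drop (i+1) := by
  conv_lhs => rw [← List.take_append_drop i xs]
  rw [List.getElem_cons_drop h]

theorem pvLargestRect_spec : ∀ (n : Nat) (xs : List Int), xs.length ≤ n →
    (∀ y ∈ xs, 0 ≤ y) → pvLargestRect xs = pvMax (pvAreas xs) := by
  intro n
  induction n with
  | zero =>
    intro xs h _
    have hx : xs = [] := List.eq_nil_of_length_eq_zero (by omega)
    subst hx
    simp [pvLargestRect, pvAreas, pvMax]
  | succ n ih =>
    intro xs hlen hpos
    match xs with
    | [] => simp [pvLargestRect, pvAreas, pvMax]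
    | x :: t =>
      have hmin : (x::t).min? = some (((x::t).min?).getD 0) := by simp
      unfold pvLargestRect
      set v := ((x::t).min?).getD 0 with hv
      obtain ⟨hv_mem, hv_le⟩ := (List.min?_eq_some_iff).1 hmin
      set i := (x::t).idxOf v with hidef
      have hiL : i < (x::t).length := List.idxOf_lt_length_of_mem hv_mem
      have hxi : (x::t)[i] = v := List.getElem_idxOf hiL
      set A := (x::t).take i with hA
      set C := (x::t).drop (i+1) with hC
      have hAlen : A.length = i := by rw [hA, List.length_take]; omega
      have hClen : C.length = (x::t).length - i - 1 := by rw [hC, List.length_drop]; omega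
      have hdecomp : (x::t : List Int) = A ++ v :: C := by
        rw [hA, hC, ← hxi]; exact pv_decomp _ i hiL
      have hdecomp2 : (x::t : List Int) = (A ++ [v]) ++ C := by
        rw [hdecomp, List.append_assoc, List.singleton_append]
      have hAvlen : (A ++ [v]).length = i + 1 := by simp [hAlen]
      have hv0 : (0:Int) ≤ v := hpos v hv_mem
      have hIH1 : pvLargestRect A = pvMax (pvAreas A) :=
        ih A (by omega) (fun y hy => hpos y (List.take_subset _ _ hy))
      have hIH2 : pvLargestRect C = pvMax (pvAreas C) :=
        ih C (by simp only [hClen, List.length_cons] at *; omega)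
          (fun y hy => hpos y (List.drop_subset _ _ hy))
      have hfull : (((x::t).length : Int)) * v = pvAreaOf (x::t) 0 ((x::t).length - 1) := by
        unfold pvAreaOf
        have e : (x::t).length - 1 + 1 - 0 = (x::t).length := by simp
        rw [e, List.drop_zero, List.take_length, pvMin_eq hv_mem hv_le]
      have hfull_mem : (((x::t).length : Int)) * v ∈ pvAreas (x::t) := by
        rw [hfull]
        exact pvAreas_mem.2 ⟨0, (x::t).length - 1, by omega, by simp, rfl⟩
      have h0le : (0:Int) ≤ pvMax (pvAreas (x::t)) :=
        le_trans (mul_nonneg (by positivity) hv0) (le_pvMax hfull_mem)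
      have hboundA : pvMax (pvAreas A) ≤ pvMax (pvAreas (x::t)) := by
        by_cases hA0 : pvAreas A = []
        · rw [hA0]; simpa [pvMax] using h0le
        · refine pvMax_le hA0 ?_
          intro y hy
          obtain ⟨l, r, hlr, hrA, rfl⟩ := pvAreas_mem.1 hy
          refine le_pvMax (pvAreas_mem.2 ⟨l, r, hlr, by omega, ?_⟩)
          rw [hdecomp, pv_areaOf_left A (v::C) l r (by omega) hlr]
      have hboundC : pvMax (pvAreas C) ≤ pvMax (pvAreas (x::t)) := by
        by_cases hC0 : pvAreas C = []
        · rw [hC0]; simpa [pvMax] using h0le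
        · refine pvMax_le hC0 ?_
          intro y hy
          obtain ⟨l, r, hlr, hrC, rfl⟩ := pvAreas_mem.1 hy
          refine le_pvMax (pvAreas_mem.2 ⟨(A ++ [v]).length + l, (A ++ [v]).length + r,
            by omega, by omega, ?_⟩)
          rw [hdecomp2, pv_areaOf_right]
      apply le_antisymm
      · exact max_le (le_pvMax hfull_mem)
          (max_le (hIH1 ▸ hboundA) (hIH2 ▸ hboundC))
      · refine pvMax_le (List.ne_nil_of_mem hfull_mem) ?_
        intro y hy
        obtain ⟨l, r, hlr, hrL, rfl⟩ := pvAreas_mem.1 hy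
        rcases lt_or_ge r i with hri | hri
        · have heq : pvAreaOf (x::t) l r = pvAreaOf A l r := by
            rw [hdecomp, pv_areaOf_left A (v::C) l r (by omega) hlr]
          rw [heq]
          refine le_trans (le_trans ?_ (le_of_eq hIH1.symm)) (le_trans (le_max_left _ _) (le_max_right _ _))
          exact le_pvMax (pvAreas_mem.2 ⟨l, r, hlr, by omega, rfl⟩)
        · rcases lt_or_ge i l with hil | hil
          · have hshift := pv_areaOf_right (A ++ [v]) C (l - i - 1) (r - i - 1)
            have e1 : (A ++ [v]).length + (l - i - 1) = l := by omega
            have e2 : (A ++ [v]).length + (r - i - 1) = r := by omega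
            have heq : pvAreaOf (x::t) l r = pvAreaOf C (l - i - 1) (r - i - 1) := by
              rw [hdecomp2, ← hshift, e1, e2]
            rw [heq]
            refine le_trans (le_trans ?_ (le_of_eq hIH2.symm)) (le_trans (le_max_right _ _) (le_max_right _ _))
            exact le_pvMax (pvAreas_mem.2 ⟨l - i - 1, r - i - 1, by omega, by omega, rfl⟩)
          · have hminw : pvMin (((x::t).drop l).take (r+1-l)) = v := by
              rw [← hxi]
              exact pv_min_window (x::t) i l r hiL hrL hil hri (by rw [hxi]; exact hv_le)
            unfold pvAreaOf
            rw [hminw]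
            refine le_trans (mul_le_mul_of_nonneg_right ?_ hv0) (le_max_left _ _)
            exact_mod_cast Nat.le_of_lt_succ (by omega : r + 1 - l < (x::t).length + 1)


-- the characters of row i, and the fresh heights of row i as a function
def pvG (b : List String) (i : Nat) : Nat → Char := fun t => pvGetC b i t
def pvF (b : List String) (i m : Nat) (s : List Int) : Nat → Int :=
  fun t => (pvNewS b i m s).getD t 0

-- the common per-column contribution: all alternating windows with right end r
def pvPerJF (g : Nat → Char) (f : Nat → Int) (a : Int) (r : Nat) : Int :=
  (List.range (pvT g r + 1)).foldl (fun a w => max a (pvArea f w r)) a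

theorem pvNewS_length (b : List String) (i m : Nat) (s : List Int) :
    (pvNewS b i m s).length = m := by simp [pvNewS]

theorem pvNewS_getD (b : List String) (i m : Nat) (s : List Int) {j : Nat} (h : j < m) :
    (pvNewS b i m s).getD j 0
      = 1 + (if 0 < i ∧ pvGetC b i j ≠ pvGetC b (i-1) j then s.getD j 0 else 0) := by
  rw [List.getD_eq_getElem _ _ (by simp [pvNewS_length]; omega)]
  simp [pvNewS]

theorem pvNewS_pos (b : List String) (i m : Nat) (s : List Int)
    (hpos : ∀ y ∈ s, 0 ≤ y) : ∀ y ∈ pvNewS b i m s, 0 ≤ y := by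
  intro y hy
  simp only [pvNewS, List.mem_map, List.mem_range] at hy
  obtain ⟨j, _, rfl⟩ := hy
  split
  · rename_i hc
    by_cases hj : ∃ hlt : j < s.length, s.getD j 0 = s[j]
    all_goals
      have : 0 ≤ s.getD j 0 := by
        by_cases hjl : j < s.length
        · rw [List.getD_eq_getElem _ _ hjl]; exact hpos _ (List.getElem_mem hjl)
        · rw [List.getD_eq_default _ _ (by omega)]
      omega
  · omega

theorem pvMin_singleton (x : Int) : pvMin [x] = x := by simp [pvMin]

theorem pvInnerA_congr (b : List String) (i : Nat) (s₁ s₂ : List Int) (j : Nat)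
    (hc : ∀ t, t < j → s₁.getD t 0 = s₂.getD t 0) :
    ∀ rem k h0 a, k + rem = j →
      pvInnerA b i s₁ j k rem h0 a = pvInnerA b i s₂ j k rem h0 a
  | 0, k, h0, a, _ => rfl
  | rem+1, k, h0, a, hk => by
    unfold pvInnerA
    split
    · rfl
    · rw [hc (j-k-1) (by omega)]
      exact pvInnerA_congr b i s₁ s₂ j hc rem (k+1) _ _ (by omega)

theorem pvInnerA_spec (b : List String) (i : Nat) (s : List Int) (j : Nat) :
    ∀ rem k a, k + rem = j → k ≤ pvT (pvG b i) j →
      pvInnerA b i s j k rem (pvMin (pvW (fun t => s.getD t 0) (j-k) j)) a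
        = (List.range' (k+1) (pvT (pvG b i) j - k)).foldl
            (fun a w => max a (pvArea (fun t => s.getD t 0) w j)) a
  | 0, k, a, hk, hT => by
    have h2 : pvT (pvG b i) j = k := by
      have := pvT_le (pvG b i) j
      omega
    rw [h2]
    simp [pvInnerA]
  | rem+1, k, a, hk, hT => by
    rcases eq_or_lt_of_le hT with hkT | hkT
    · rw [← hkT]
      simp only [Nat.sub_self, List.range'_zero, List.foldl_nil]
      unfold pvInnerA
      have hE := pvT_eq (pvG b i) j (by omega)
      rw [← hkT] at hE
      simp only [pvG] at hE
      rw [if_pos hE]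
    · have hne := pvT_diff (pvG b i) j k hkT
      simp only [pvG] at hne
      unfold pvInnerA
      rw [if_neg hne]
      have hmin : min (pvMin (pvW (fun t => s.getD t 0) (j-k) j)) (s.getD (j-k-1) 0)
          = pvMin (pvW (fun t => s.getD t 0) (j-(k+1)) j) := by
        have e1 : j - (k+1) = j - k - 1 := by omega
        rw [e1]
        conv_rhs => rw [pvMin_W_cons _ (show j - k - 1 < j by omega)]
        rw [show j - k - 1 + 1 = j - k from by omega, min_comm]
      have harea : (pvMin (pvW (fun t => s.getD t 0) (j-(k+1)) j)) * ((k : Int)+2)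
          = pvArea (fun t => s.getD t 0) (k+1) j := by
        unfold pvArea
        push_cast
        ring
      rw [hmin, harea]
      have hrng : List.range' (k+1) (pvT (pvG b i) j - k)
          = (k+1) :: List.range' (k+2) (pvT (pvG b i) j - (k+1)) := by
        rw [show pvT (pvG b i) j - k = (pvT (pvG b i) j - (k+1)) + 1 from by omega,
          List.range'_succ]
      rw [hrng, List.foldl_cons]
      exact pvInnerA_spec b i s j rem (k+1) _ (by omega) hkT

-- A's in-place row state: first j entries fresh, the rest from the previous row
def pvMix (b : List String) (i m : Nat) (s : List Int) (j : Nat) : List Int :=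
  (pvNewS b i m s).take j ++ s.drop j

theorem pvMix_zero (b : List String) (i m : Nat) (s : List Int) :
    pvMix b i m s 0 = s := by simp [pvMix]

theorem pvMix_last (b : List String) (i m : Nat) (s : List Int) (hs : s.length = m) :
    pvMix b i m s m = pvNewS b i m s := by
  unfold pvMix
  rw [List.take_of_length_le (by simp [pvNewS_length]), List.drop_eq_nil_of_le (by omega),
    List.append_nil]

theorem pvMix_getD_lt (b : List String) (i m : Nat) (s : List Int) {t j : Nat}
    (ht : t < j) (hj : j ≤ m) :
    (pvMix b i m s j).getD t 0 = (pvNewS b i m s).getD t 0 := by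
  unfold pvMix
  rw [List.getD_append _ _ _ t (by simp [List.length_take, pvNewS_length]; omega),
    List.getD_eq_getElem _ _ (by simp [List.length_take, pvNewS_length]; omega),
    List.getElem_take, List.getD_eq_getElem _ _ (by simp [pvNewS_length]; omega)]

theorem pvMix_getD_self (b : List String) (i m : Nat) (s : List Int) {j : Nat}
    (hj : j < m) (hs : s.length = m) :
    (pvMix b i m s j).getD j 0 = s.getD j 0 := by
  unfold pvMix
  have hlt : (((pvNewS b i m s).take j)).length = j := by
    simp [List.length_take, pvNewS_length]; omega
  rw [List.getD_append_right _ _ _ j (by omega), hlt, Nat.sub_self,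
    List.getD_eq_getElem _ _ (by simp [List.length_drop]; omega),
    List.getElem_drop, List.getD_eq_getElem _ _ (by omega)]
  simp

theorem pvMix_set (b : List String) (i m : Nat) (s : List Int) {j : Nat}
    (hj : j < m) (hs : s.length = m) :
    (pvMix b i m s j).set j ((pvNewS b i m s).getD j 0) = pvMix b i m s (j+1) := by
  unfold pvMix
  have hlt : (((pvNewS b i m s).take j)).length = j := by
    simp [List.length_take, pvNewS_length]; omega
  rw [List.set_append, if_neg (by omega), hlt, Nat.sub_self]
  have hdrop : s.drop j = s[j]'(by omega) :: s.drop (j+1) :=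
    (List.getElem_cons_drop (by omega)).symm
  rw [hdrop]
  simp only [List.set_cons_zero]
  rw [List.take_add_one]
  have hget : (pvNewS b i m s)[j]? = some ((pvNewS b i m s).getD j 0) := by
    rw [List.getElem?_eq_getElem (by simp [pvNewS_length]; omega),
      List.getD_eq_getElem _ _ (by simp [pvNewS_length]; omega)]
  rw [hget]
  simp

theorem pv_rowA (b : List String) (i m : Nat) (s : List Int) (hs : s.length = m) :
    ∀ (n j : Nat), j + n = m → ∀ a,
      (List.range' j n).foldl (pvColA b i) (pvMix b i m s j, a)
        = (pvMix b i m s m,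
           (List.range' j n).foldl (pvPerJF (pvG b i) (pvF b i m s)) a)
  | 0, j, hj, a => by
    have hjm : j = m := by omega
    subst hjm
    simp
  | n+1, j, hj, a => by
    rw [List.range'_succ, List.foldl_cons, List.foldl_cons]
    have hjm : j < m := by omega
    have hstep : pvColA b i (pvMix b i m s j, a) j
        = (pvMix b i m s (j+1), pvPerJF (pvG b i) (pvF b i m s) a j) := by
      unfold pvColA
      simp only
      rw [pvMix_getD_self b i m s hjm hs]
      have hH : (1 : Int) + (if 0 < i ∧ pvGetC b i j ≠ pvGetC b (i-1) j then s.getD j 0 else 0)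
          = (pvNewS b i m s).getD j 0 := (pvNewS_getD b i m s hjm).symm
      rw [hH, pvMix_set b i m s hjm hs]
      refine Prod.ext rfl ?_
      simp only
      -- the inner loop equals the windows-ending-at-j fold
      rw [pvInnerA_congr b i (pvMix b i m s (j+1)) (pvNewS b i m s) j
            (fun t ht => pvMix_getD_lt b i m s (by omega) (by omega)) j 0 _ _ (by omega)]
      have hstart : (pvNewS b i m s).getD j 0
          = pvMin (pvW (fun t => (pvNewS b i m s).getD t 0) (j-0) j) := by
        rw [Nat.sub_zero, pvW_singleton, pvMin_singleton]
      rw [hstart, pvInnerA_spec b i (pvNewS b i m s) j j 0 _ (by omega) (by omega)]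
      unfold pvPerJF pvF
      rw [List.range_eq_range', List.range'_succ, List.foldl_cons]
      have h0 : max a (pvArea (fun t => (pvNewS b i m s).getD t 0) 0 j)
          = max a (pvMin (pvW (fun t => (pvNewS b i m s).getD t 0) (j-0) j)) := by
        unfold pvArea
        norm_num
      rw [h0, ← hstart, Nat.sub_zero]
    rw [hstep]
    exact pv_rowA b i m s hs n (j+1) (by omega) _

theorem pv_rowA_full (b : List String) (i m : Nat) (s : List Int) (hs : s.length = m) (a : Int) :
    (List.range m).foldl (pvColA b i) (s, a)
      = (pvNewS b i m s,
         (List.range m).foldl (pvPerJF (pvG b i) (pvF b i m s)) a) := by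
  have h := pv_rowA b i m s hs m 0 (by omega) a
  rw [pvMix_zero, pvMix_last b i m s hs, ← List.range_eq_range'] at h
  exact h


theorem pvT_back (g : Nat → Char) (q : Nat) :
    ∀ d, d ≤ pvT g q → pvT g q - d = pvT g (q - d)
  | 0, _ => by simp
  | d+1, hd => by
    have hTq := pvT_le g q
    have hprev := pvT_back g q d (by omega)
    have hq' : q - d = (q - (d+1)) + 1 := by omega
    have hstep : pvT g (q - d) = pvT g (q - (d+1)) + 1 := by
      rw [hq']
      have hne := pvT_diff g q d (by omega)
      have e1 : q - (d+1) = q - d - 1 := by omega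
      have e2 : q - (d+1) + 1 = q - d := by omega
      simp only [pvT, e1]
      rw [show q - d - 1 + 1 = q - d from by omega, if_neg hne]
    omega

-- B's run-flush step
def pvStepB (b : List String) (i m : Nat) (sN : List Int) (p : Int × Nat) (j : Nat) :
    Int × Nat :=
  if j + 1 = m ∨ pvGetC b i j = pvGetC b i (j+1)
  then (max p.1 (pvLargestRect ((sN.drop p.2).take (j+1-p.2))), j+1)
  else p

-- flushing one maximal alternating run equals folding its windows into the accumulator
theorem pv_run (b : List String) (i : Nat) (sN : List Int) (hpos : ∀ y ∈ sN, 0 ≤ y)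
    (q : Nat) (hq : q < sN.length) (a : Int) :
    max a (pvLargestRect ((sN.drop (q - pvT (pvG b i) q)).take (q + 1 - (q - pvT (pvG b i) q))))
      = (List.range' (q - pvT (pvG b i) q) (q + 1 - (q - pvT (pvG b i) q))).foldl
          (pvPerJF (pvG b i) (fun t => sN.getD t 0)) a := by
  have hTq := pvT_le (pvG b i) q
  set T := pvT (pvG b i) q with hT
  set p := q - T with hp
  set W := q + 1 - p with hW
  set f : Nat → Int := fun t => sN.getD t 0 with hf
  have hpq : p ≤ q := by omega
  have hW1 : 1 ≤ W := by omega
  set run := (sN.drop p).take W with hrun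
  have hrunlen : run.length = W := by
    simp only [hrun, List.length_take, List.length_drop]
    omega
  have hrunpos : ∀ y ∈ run, 0 ≤ y := fun y hy =>
    hpos y (List.drop_subset _ _ (List.take_subset _ _ hy))
  have hTr : ∀ r, p ≤ r → r ≤ q → pvT (pvG b i) r = r - p := by
    intro r h1 h2
    have := pvT_back (pvG b i) q (q - r) (by omega)
    have e : q - (q - r) = r := by omega
    rw [e] at this
    omega
  -- the bridge between run-relative windows and absolute windows
  have hbridge : ∀ l' r', l' ≤ r' → r' < W →
      pvAreaOf run l' r' = pvArea f (r' - l') (p + r') := by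
    intro l' r' hl hr
    have hslice : (run.drop l').take (r' + 1 - l')
        = (List.range' (p + l') (r' + 1 - l')).map f := by
      rw [hrun, List.drop_take, List.drop_drop, List.take_take,
        min_eq_left (by omega), pv_slice_eq_W sN (r' + 1 - l') (p + l') (by omega)]
    unfold pvAreaOf pvArea pvW
    rw [hslice]
    have e1 : p + r' - (r' - l') = p + l' := by omega
    have e2 : p + r' + 1 - (p + l') = r' + 1 - l' := by omega
    have e3 : ((r' + 1 - l' : Nat) : Int) = ((r' - l' : Nat) : Int) + 1 := by
      have : (r' + 1 - l' : Nat) = (r' - l') + 1 := by omega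
      rw [this]
      push_cast
      ring
    rw [e1, e2, e3]
  -- rewrite the fold into max-of-flatMap form
  have hinner_ne : ∀ r : Nat, (List.range (pvT (pvG b i) r + 1)).map
      (fun w => pvArea f w r) ≠ [] := by
    intro r
    simp
  have hfold : (List.range' p W).foldl (pvPerJF (pvG b i) f) a
      = max a (pvMax ((List.range' p W).flatMap
          (fun r => (List.range (pvT (pvG b i) r + 1)).map (fun w => pvArea f w r)))) := by
    rw [PySem.List.foldl_congr_mem (List.range' p W) (pvPerJF (pvG b i) f)
        (fun a r => max a (pvMax ((List.range (pvT (pvG b i) r + 1)).map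
          (fun w => pvArea f w r)))) a ?_]
    · rw [pv_foldl_max _ _ (by simp; omega) a,
        pvMax_flatMap _ (List.range' p W) (by simp; omega) (fun r _ => hinner_ne r)]
    · intro acc r _
      unfold pvPerJF
      rw [pv_foldl_max _ _ (by simp) acc]
  rw [hfold]
  -- largest_rect equals the max over the run's windows
  rw [pvLargestRect_spec run.length run le_rfl hrunpos]
  congr 1
  -- same set of values
  have hne1 : pvAreas run ≠ [] :=
    List.ne_nil_of_mem (pvAreas_mem.2 ⟨0, 0, le_rfl, by omega, rfl⟩)
  have hne2 : (List.range' p W).flatMap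
      (fun r => (List.range (pvT (pvG b i) r + 1)).map (fun w => pvArea f w r)) ≠ [] := by
    have hmem : pvArea f 0 p ∈ (List.range' p W).flatMap
        (fun r => (List.range (pvT (pvG b i) r + 1)).map (fun w => pvArea f w r)) :=
      List.mem_flatMap.2 ⟨p, List.mem_range'_1.2 ⟨le_rfl, by omega⟩,
        List.mem_map.2 ⟨0, List.mem_range.2 (by omega), rfl⟩⟩
    exact List.ne_nil_of_mem hmem
  refine pvMax_eq_of_mem_iff hne1 hne2 ?_
  intro y
  rw [pvAreas_mem]
  simp only [List.mem_flatMap, List.mem_map, List.mem_range, List.mem_range'_1]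
  constructor
  · rintro ⟨l', r', hl, hr, rfl⟩
    rw [hrunlen] at hr
    refine ⟨p + r', ⟨by omega, by omega⟩, r' - l', ?_, (hbridge l' r' hl hr).symm⟩
    rw [hTr (p + r') (by omega) (by omega)]
    omega
  · rintro ⟨r, ⟨hr1, hr2⟩, w, hw, rfl⟩
    rw [hTr r hr1 (by omega)] at hw
    refine ⟨(r - p) - w, r - p, by omega, by omega, ?_⟩
    have := hbridge ((r - p) - w) (r - p) (by omega) (by omega)
    rw [this]
    have e1 : r - p - (r - p - w) = w := by omega
    have e2 : p + (r - p) = r := by omega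
    rw [e1, e2]

theorem pv_rowB_inv (b : List String) (i m : Nat) (sN : List Int) (hlen : sN.length = m)
    (hpos : ∀ y ∈ sN, 0 ≤ y) (a : Int) :
    ∀ j, j < m → (List.range' 0 j).foldl (pvStepB b i m sN) (a, 0)
      = ((List.range' 0 (j - pvT (pvG b i) j)).foldl
           (pvPerJF (pvG b i) (fun t => sN.getD t 0)) a,
         j - pvT (pvG b i) j)
  | 0, _ => by simp [pvT]
  | j+1, h => by
    have hTj := pvT_le (pvG b i) j
    have hcat : List.range' 0 (j+1) = List.range' 0 j ++ [j] := by
      simp [List.range'_concat]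
    rw [hcat, List.foldl_append, pv_rowB_inv b i m sN hlen hpos a j (by omega),
      List.foldl_cons, List.foldl_nil]
    by_cases hE : pvGetC b i j = pvGetC b i (j+1)
    · have hT1 : pvT (pvG b i) (j+1) = 0 := by
        simp [pvT, pvG, hE]
      unfold pvStepB
      rw [if_pos (Or.inr hE)]
      simp only [hT1, Nat.sub_zero]
      refine Prod.ext ?_ rfl
      simp only
      rw [pv_run b i sN hpos j (by omega) _, ← List.foldl_append]
      have hlists : List.range' 0 (j - pvT (pvG b i) j)
            ++ List.range' (j - pvT (pvG b i) j) (j + 1 - (j - pvT (pvG b i) j))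
          = List.range' 0 (j+1) := by
        have hap := List.range'_append (s := 0) (m := j - pvT (pvG b i) j)
          (n := j + 1 - (j - pvT (pvG b i) j)) (step := 1)
        simp only [Nat.zero_add, Nat.one_mul] at hap
        rw [hap, show (j - pvT (pvG b i) j) + (j + 1 - (j - pvT (pvG b i) j)) = j + 1
          from by omega]
      rw [hlists]
    · have hT1 : pvT (pvG b i) (j+1) = pvT (pvG b i) j + 1 := by
        simp [pvT, pvG, hE]
      unfold pvStepB
      rw [if_neg (by
        rintro (h1 | h2)
        · omega
        · exact hE h2)]
      rw [hT1, show j + 1 - (pvT (pvG b i) j + 1) = j - pvT (pvG b i) j from by omega]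

theorem pv_rowB_full (b : List String) (i m : Nat) (sN : List Int) (hlen : sN.length = m)
    (hpos : ∀ y ∈ sN, 0 ≤ y) (a : Int) :
    ((List.range m).foldl (pvStepB b i m sN) (a, 0)).1
      = (List.range m).foldl (pvPerJF (pvG b i) (fun t => sN.getD t 0)) a := by
  cases m with
  | zero => simp
  | succ n =>
    have hTn := pvT_le (pvG b i) n
    rw [List.range_eq_range']
    have hcat : List.range' 0 (n+1) = List.range' 0 n ++ [n] := by
      simp [List.range'_concat]
    rw [hcat, List.foldl_append, pv_rowB_inv b i (n+1) sN hlen hpos a n (by omega),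
      List.foldl_cons, List.foldl_nil]
    unfold pvStepB
    rw [if_pos (Or.inl rfl)]
    simp only
    rw [pv_run b i sN hpos n (by omega) _, ← List.foldl_append]
    have hlists : List.range' 0 (n - pvT (pvG b i) n)
          ++ List.range' (n - pvT (pvG b i) n) (n + 1 - (n - pvT (pvG b i) n))
        = List.range' 0 (n+1) := by
      have hap := List.range'_append (s := 0) (m := n - pvT (pvG b i) n)
        (n := n + 1 - (n - pvT (pvG b i) n)) (step := 1)
      simp only [Nat.zero_add, Nat.one_mul] at hap
      rw [hap, show (n - pvT (pvG b i) n) + (n + 1 - (n - pvT (pvG b i) n)) = n + 1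
        from by omega]
    rw [hlists, ← hcat]


-- both programs process rows identically: same fresh heights, same answer
theorem pv_rows (b : List String) (m : Nat) :
    ∀ (L : List Nat) (s : List Int) (a : Int), s.length = m → (∀ y ∈ s, 0 ≤ y) →
      L.foldl (fun st i => (List.range m).foldl (pvColA b i) st) (s, a)
        = L.foldl (fun (st : List Int × Int) i =>
            (pvNewS b i m st.1,
             ((List.range m).foldl (pvStepB b i m (pvNewS b i m st.1)) (st.2, 0)).1)) (s, a)
  | [], s, a, _, _ => rfl
  | i :: L, s, a, hs, hp => by
    rw [List.foldl_cons, List.foldl_cons, pv_rowA_full b i m s hs a]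
    have hB : ((List.range m).foldl (pvStepB b i m (pvNewS b i m s)) (a, 0)).1
        = (List.range m).foldl (pvPerJF (pvG b i) (pvF b i m s)) a := by
      rw [pv_rowB_full b i m (pvNewS b i m s) (pvNewS_length b i m s)
        (pvNewS_pos b i m s hp) a]
      rfl
    simp only
    rw [hB]
    exact pv_rows b m L (pvNewS b i m s) _ (pvNewS_length b i m s) (pvNewS_pos b i m s hp)

-- ===== VERDICT =====
theorem MaxArea_spec : Claim_equal_MaxArea := by
  unfold Claim_equal_MaxArea Spec_MaxArea
  intro b _ _
  have h := pv_rows b ((b.headD "").toList.length) (List.range b.length)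
    (List.replicate ((b.headD "").toList.length) 0) 0 (by simp)
    (fun y hy => by rw [List.eq_of_mem_replicate hy])
  exact congrArg Prod.snd h
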